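-- pv_equiv track=rewrite | github.com/ryodisney/keiba | weight.py | Judge_Sort
-- ===== SOURCE A (Python) =====
-- def Judge_Sort(score_data,flag):
--
--     score_data_sorted = sorted(score_data)
--
--     for i,score in enumerate(score_data_sorted):
--         if score == score_data[i]:
--             if i > 1:
--                 flag = True
--                 break
--
--         else:
--             break
--
--     return flag
--
--
--     return flag
-- ===== SOURCE B (Python) =====
-- def Judge_Sort(score_data, flag):
--     if len(score_data) > 2:
--         if score_data[0] <= score_data[1] <= score_data[2] and all(score_data[2] <= x for x in score_data[3:]):
--             flag = True
--     return flag
-- ===== Notes on version B (the rewrite author's own statement) =====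
-- stated objective: faster
-- what changed: B drops the sorted copy and the enumerate loop entirely and checks the defining property directly: the first three elements are non-decreasing and the third is <= every later element.
import Mathlib
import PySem

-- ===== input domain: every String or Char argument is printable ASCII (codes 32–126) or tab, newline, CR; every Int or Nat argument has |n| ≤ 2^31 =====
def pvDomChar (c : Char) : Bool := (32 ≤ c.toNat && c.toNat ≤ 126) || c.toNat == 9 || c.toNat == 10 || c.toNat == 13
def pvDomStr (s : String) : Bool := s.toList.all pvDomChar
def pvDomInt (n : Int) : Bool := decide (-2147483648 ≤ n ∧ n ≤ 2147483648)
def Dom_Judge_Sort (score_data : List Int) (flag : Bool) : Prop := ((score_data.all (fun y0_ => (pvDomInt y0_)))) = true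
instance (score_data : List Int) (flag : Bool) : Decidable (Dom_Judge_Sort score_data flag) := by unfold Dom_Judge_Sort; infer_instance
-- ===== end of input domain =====

-- B checks the defining property directly (prefix non-decreasing and third element ≤ every tail
-- element) instead of building a sorted copy; objective: simpler/faster (no sort).

-- ===== PORT A =====
-- the for-loop with its two breaks, over enumerate(sorted(score_data))
def judgeSortLoop (score_data : List Int) : List (Int × Int) → Bool → Bool
  | [], flag => flag
  | (i, score) :: rest, flag =>
    if PySem.List.pyGet? score_data i = some score then
      if i > 1 then true
      else judgeSortLoop score_data rest flag
    else flag

def Judge_Sort (score_data : List Int) (flag : Bool) : Bool :=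
  judgeSortLoop score_data
    (PySem.List.enumerate (PySem.List.sorted score_data (fun x => x) false)) flag

-- ===== PORT B =====
def Judge_Sort_alt (score_data : List Int) (flag : Bool) : Bool :=
  match score_data with
  | a :: b :: c :: rest =>
      if a ≤ b && b ≤ c && rest.all (fun x => c ≤ x) then true else flag
  | _ => flag

-- ===== PRECONDITION & SPEC =====
def Spec_Judge_Sort (score_data : List Int) (flag : Bool) (out : Bool) : Prop := out = Judge_Sort_alt score_data flag
instance (score_data : List Int) (flag : Bool) (out : Bool) : Decidable (Spec_Judge_Sort score_data flag out) := by unfold Spec_Judge_Sort; infer_instance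

-- ===== CLAIM (what is proved, stated in full; the proofs are below) =====
def Claim_equal_Judge_Sort : Prop := ∀ (score_data : List Int) (flag : Bool), Dom_Judge_Sort score_data flag → Spec_Judge_Sort score_data flag (Judge_Sort score_data flag)

-- ===== LEMMAS AND PROOFS =====

-- the loop returns flag unchanged when every index in the enumerate list is ≤ 1
lemma judgeSortLoop_flag (L : List Int) (el : List (Int × Int)) (flag : Bool)
    (h : ∀ p ∈ el, p.1 ≤ 1) : judgeSortLoop L el flag = flag := by
  induction el with
  | nil => rfl
  | cons p rest ih =>
    obtain ⟨i, score⟩ := p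
    have hi : i ≤ 1 := h (i, score) (List.mem_cons_self ..)
    simp only [judgeSortLoop]
    split
    · rw [if_neg (by omega)]
      exact ih (fun q hq => h q (List.mem_cons_of_mem _ hq))
    · rfl

-- the loop on a ≥3-element sorted list compares exactly the first three positions
lemma judgeSortLoop_eval (L : List Int) (s0 s1 s2 : Int) (t : List Int) (flag : Bool) :
    judgeSortLoop L (PySem.List.enumerate (s0 :: s1 :: s2 :: t)) flag =
      if PySem.List.pyGet? L 0 = some s0 then
        if PySem.List.pyGet? L 1 = some s1 then
          if PySem.List.pyGet? L 2 = some s2 then true else flag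
        else flag
      else flag := by
  simp only [PySem.List.enumerate_cons, judgeSortLoop]
  norm_num

-- if the first three elements are in order and dominate the tail, sorting keeps them in place
lemma sorted_form (a b c : Int) (rest : List Int)
    (h1 : a ≤ b) (h2 : b ≤ c) (h3 : ∀ x ∈ rest, c ≤ x) :
    PySem.List.sorted (a :: b :: c :: rest) (fun x => x) false
      = a :: b :: c :: PySem.List.sorted rest (fun x => x) false := by
  apply PySem.List.sorted_id_eq_of_perm_of_pairwise
  · exact (PySem.List.sorted_perm rest (fun x => x) false).cons c |>.cons b |>.cons a
  · have hp : (PySem.List.sorted rest (fun x => x) false).Pairwise (· ≤ ·) :=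
      PySem.List.sorted_pairwise rest (fun x => x)
    have hmem : ∀ x ∈ PySem.List.sorted rest (fun x => x) false, c ≤ x := by
      intro x hx; exact h3 x ((PySem.List.mem_sorted _ _ _ _).1 hx)
    refine List.pairwise_cons.2 ⟨?_, List.pairwise_cons.2 ⟨?_, List.pairwise_cons.2 ⟨hmem, hp⟩⟩⟩
    · intro y hy
      simp only [List.mem_cons] at hy
      rcases hy with rfl | rfl | hy
      · exact h1
      · exact le_trans h1 h2
      · exact le_trans (le_trans h1 h2) (hmem _ hy)
    · intro y hy
      simp only [List.mem_cons] at hy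
      rcases hy with rfl | hy
      · exact h2
      · exact le_trans h2 (hmem _ hy)

-- conversely, if sorting keeps the first three elements in place, the property holds
lemma cond_of_sorted (a b c : Int) (rest t : List Int)
    (hS : PySem.List.sorted (a :: b :: c :: rest) (fun x => x) false = a :: b :: c :: t) :
    a ≤ b ∧ b ≤ c ∧ ∀ x ∈ rest, c ≤ x := by
  have hp : (a :: b :: c :: t).Pairwise (· ≤ ·) := by
    have := PySem.List.sorted_pairwise (a :: b :: c :: rest) (fun x => x)
    rwa [hS] at this
  have hperm : (a :: b :: c :: t).Perm (a :: b :: c :: rest) := by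
    rw [← hS]; exact PySem.List.sorted_perm ..
  obtain ⟨ha, hp⟩ := List.pairwise_cons.1 hp
  obtain ⟨hb, hp⟩ := List.pairwise_cons.1 hp
  obtain ⟨hc, _⟩ := List.pairwise_cons.1 hp
  have hab : a ≤ b := ha b (List.mem_cons_self ..)
  have hbc : b ≤ c := hb c (List.mem_cons_self ..)
  refine ⟨hab, hbc, ?_⟩
  -- count the elements strictly below c on both sides of the permutation
  have hcount := hperm.countP_eq (fun y => decide (y < c))
  have ht0 : t.countP (fun y => decide (y < c)) = 0 :=
    List.countP_eq_zero.2 (fun y hy => by simpa using not_lt.2 (hc y hy))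
  simp only [List.countP_cons, ht0] at hcount
  have hr0 : rest.countP (fun y => decide (y < c)) = 0 := by omega
  intro x hx
  by_contra hlt
  have hpos : 0 < rest.countP (fun y => decide (y < c)) := by
    rw [List.countP_pos_iff]
    exact ⟨x, hx, by simpa using not_le.1 hlt⟩
  omega

-- ===== VERDICT (by name: the statement is the Claim_ definition above) =====
theorem Judge_Sort_spec : Claim_equal_Judge_Sort := by
  intro score_data flag _
  unfold Spec_Judge_Sort
  match score_data with
  | [] => rfl
  | [a] =>
    apply judgeSortLoop_flag
    intro p hp
    rw [PySem.List.mem_enumerate_iff] at hp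
    obtain ⟨k, hk, rfl⟩ := hp
    have : k < 1 := by simpa [PySem.List.length_sorted] using hk
    omega
  | [a, b] =>
    apply judgeSortLoop_flag
    intro p hp
    rw [PySem.List.mem_enumerate_iff] at hp
    obtain ⟨k, hk, rfl⟩ := hp
    have : k < 2 := by simpa [PySem.List.length_sorted] using hk
    omega
  | a :: b :: c :: rest =>
    -- name the first three elements of the sorted list
    have hlen : 3 ≤ (PySem.List.sorted (a :: b :: c :: rest) (fun x => x) false).length := by
      rw [PySem.List.length_sorted]; simp
    obtain ⟨s0, s1, s2, t, hS⟩ :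
        ∃ s0 s1 s2 t, PySem.List.sorted (a :: b :: c :: rest) (fun x => x) false
          = s0 :: s1 :: s2 :: t := by
      match hE : PySem.List.sorted (a :: b :: c :: rest) (fun x => x) false with
      | s0 :: s1 :: s2 :: t => exact ⟨s0, s1, s2, t, rfl⟩
      | [] | [_] | [_, _] => rw [hE] at hlen; simp at hlen
    have hB : Judge_Sort_alt (a :: b :: c :: rest) flag
        = if (a ≤ b && b ≤ c && rest.all (fun x => decide (c ≤ x))) = true
          then true else flag := rfl
    have g0 : PySem.List.pyGet? (a :: b :: c :: rest) 0 = some a := by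
        simp [PySem.List.pyGet?, PySem.List.pyIdx?, show ((0:Int) ≤ ↑rest.length + 1 + 1) from by omega]
    have g1 : PySem.List.pyGet? (a :: b :: c :: rest) 1 = some b := by
        simp [PySem.List.pyGet?, PySem.List.pyIdx?, show ((0:Int) ≤ ↑rest.length + 1) from by omega]
    have g2 : PySem.List.pyGet? (a :: b :: c :: rest) 2 = some c := by
        simp [PySem.List.pyGet?, PySem.List.pyIdx?, show ((2:Int) ≤ ↑rest.length + 1 + 1) from by omega]
    have hA : Judge_Sort (a :: b :: c :: rest) flag
        = if s0 = a then if s1 = b then if s2 = c then true else flag else flag else flag := by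
      unfold Judge_Sort
      rw [hS, judgeSortLoop_eval, g0, g1, g2]
      simp [eq_comm]
    rw [hA, hB]
    by_cases hcond : (a ≤ b && b ≤ c && rest.all (fun x => decide (c ≤ x))) = true
    · -- B condition holds: sorted keeps the prefix, so all three comparisons succeed
      simp only [Bool.and_eq_true, decide_eq_true_eq, List.all_eq_true] at hcond
      obtain ⟨⟨h1, h2⟩, h3⟩ := hcond
      have hform := sorted_form a b c rest h1 h2 (fun x hx => by simpa using h3 x hx)
      rw [hS] at hform
      injection hform with e0 hform
      injection hform with e1 hform
      injection hform with e2 _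
      simp [e0, e1, e2, h1, h2]
      exact Or.inl h3
    · -- B condition fails: the sorted prefix cannot be a, b, c
      have hpref : ¬ (s0 = a ∧ s1 = b ∧ s2 = c) := by
        rintro ⟨rfl, rfl, rfl⟩
        obtain ⟨h1, h2, h3⟩ := cond_of_sorted _ _ _ rest t hS
        apply hcond
        simp only [Bool.and_eq_true, decide_eq_true_eq, List.all_eq_true]
        exact ⟨⟨h1, h2⟩, fun x hx => by simpa using h3 x hx⟩
      rw [if_neg hcond]
      by_cases e0 : s0 = a
      · by_cases e1 : s1 = b
        · by_cases e2 : s2 = c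
          · exact absurd ⟨e0, e1, e2⟩ hpref
          · simp [e0, e1, e2]
        · simp [e0, e1]
      · simp [e0]
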